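-- pv_equiv track=rewrite | github.com/amanuel1271/Problem-Solving | 1471-the-k-strongest-values-in-an-array/1471-the-k-strongest-values-in-an-array.py | getStrongest
-- ===== SOURCE A (Python) =====
-- from typing import List
--
-- def getStrongest(arr: List[int], k: int) -> List[int]:
--     l,r = 0,len(arr)-1
--     ans = []
--     arr.sort()
--     median = arr[(len(arr)-1)//2]
--
--     while k > 0:
--         if abs(arr[r] - median) >= abs(arr[l]-median):
--             ans.append(arr[r])
--             r -= 1
--         else:
--             ans.append(arr[l])
--             l += 1
--         k -= 1
--
--     return ans
-- ===== SOURCE B (Python) =====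
-- from typing import List
--
-- def getStrongest(arr: List[int], k: int) -> List[int]:
--     arr.sort()
--     median = arr[(len(arr) - 1) // 2]
--     strongest = sorted(arr, key=lambda x: (abs(x - median), x), reverse=True)
--     return [x for _, x in zip(range(k), strongest)]
-- ===== Notes on version B (the rewrite author's own statement) =====
-- stated objective: idiomatic
-- what changed: Replaces A's index-juggling two-pointer merge from both ends of the sorted array by a single key-based sort (key=(abs(x-median), x), reverse=True) from which the first k elements are taken.
-- outside the precondition, e.g. on getStrongest([1], 2): A returns [1, 1], B returns [1]
import Mathlib
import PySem

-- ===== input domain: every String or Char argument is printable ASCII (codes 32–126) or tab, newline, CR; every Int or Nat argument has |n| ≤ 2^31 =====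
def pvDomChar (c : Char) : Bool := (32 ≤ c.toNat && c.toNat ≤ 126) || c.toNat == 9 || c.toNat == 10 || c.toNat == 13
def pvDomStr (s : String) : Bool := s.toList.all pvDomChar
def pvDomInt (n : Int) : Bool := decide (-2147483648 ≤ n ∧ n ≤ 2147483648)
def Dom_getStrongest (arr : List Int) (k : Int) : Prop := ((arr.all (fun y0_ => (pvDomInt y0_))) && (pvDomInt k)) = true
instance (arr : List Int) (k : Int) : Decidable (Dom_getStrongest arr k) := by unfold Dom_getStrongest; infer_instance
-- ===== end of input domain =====

-- B replaces A's two-pointer merge from both ends of the sorted array by a single key-based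
-- sort (key = (abs(x-median), x), reverse=True) followed by a slice; objective: idiomatic.
-- Both A and B sort arr in place (the caller sees arr left sorted ascending either way);
-- the equivalence proved here is about the RETURN value.

-- ===== PORT A =====
-- the 'while k > 0' loop: runs k times; pyGet? = none is Python's IndexError (loop state returned
-- there is arbitrary — those inputs are excluded by Pre_)
def getStrongestLoop (s : List Int) (median : Int) : Int → Int → List Int → Nat → List Int
  | _, _, ans, 0 => ans
  | l, r, ans, fuel+1 =>
    match PySem.List.pyGet? s r, PySem.List.pyGet? s l with
    | some ar, some al =>
      if |ar - median| ≥ |al - median| then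
        getStrongestLoop s median l (r - 1) (ans ++ [ar]) fuel
      else
        getStrongestLoop s median (l + 1) r (ans ++ [al]) fuel
    | _, _ => ans

def getStrongest (arr : List Int) (k : Int) : List Int :=
  let r : Int := (arr.length : Int) - 1
  let s := PySem.List.sorted arr (fun x => x) false
  match PySem.List.pyGet? s (PySem.Int.floordiv ((s.length : Int) - 1) 2) with
  | none => []      -- IndexError on empty arr; excluded by Pre_
  | some median => getStrongestLoop s median 0 r [] k.toNat

-- ===== PORT B =====
def getStrongest_alt (arr : List Int) (k : Int) : List Int :=
  let s := PySem.List.sorted arr (fun x => x) false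
  match PySem.List.pyGet? s (PySem.Int.floordiv ((s.length : Int) - 1) 2) with
  | none => []      -- IndexError on empty arr; excluded by Pre_
  | some median =>
    let strongest := PySem.List.sorted2 s (fun x => |x - median|) (fun x => x) true
    ((PySem.List.pyRange 0 k 1).zip strongest).map Prod.snd

-- ===== PRECONDITION & SPEC =====
-- Pre_ excludes the empty list (A raises IndexError computing the median) and k > len(arr),
-- where A's negative-index wraparound re-appends already-taken elements or raises IndexError —
-- a corner outside the function's 1 ≤ k ≤ len(arr) task, on which A's value is accidental.
def Pre_getStrongest (arr : List Int) (k : Int) : Prop :=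
  arr ≠ [] ∧ k ≤ (arr.length : Int)
instance (arr : List Int) (k : Int) : Decidable (Pre_getStrongest arr k) := by
  unfold Pre_getStrongest; infer_instance

def pvWitness_getStrongest : List Int × Int := ([1, 2, 3, 4, 5], 3)

def Spec_getStrongest (arr : List Int) (k : Int) (out : List Int) : Prop := out = getStrongest_alt arr k
instance (arr : List Int) (k : Int) (out : List Int) : Decidable (Spec_getStrongest arr k out) := by
  unfold Spec_getStrongest; infer_instance

-- ===== CLAIM (what is proved, stated in full; the proofs are below) =====
def Claim_equal_getStrongest : Prop := ∀ (arr : List Int) (k : Int), Dom_getStrongest arr k → Pre_getStrongest arr k → Spec_getStrongest arr k (getStrongest arr k)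

-- ===== LEMMAS AND PROOFS =====

-- the lexicographic key under which both programs list elements: ascending pvKey = descending (|x-m|, x)
def pvKey (m x : Int) : Lex (Int × Int) := toLex (-(|x - m|), -x)

lemma pvKey_le_iff (m y z : Int) :
    pvKey m y ≤ pvKey m z ↔ (|z - m| < |y - m| ∨ (|z - m| = |y - m| ∧ z ≤ y)) := by
  simp only [pvKey, Prod.Lex.le_iff, ofLex_toLex]
  omega

lemma pvKey_lt_iff (m a b : Int) :
    pvKey m a < pvKey m b ↔ (|b - m| < |a - m| ∨ (|b - m| = |a - m| ∧ b < a)) := by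
  simp only [pvKey, Prod.Lex.lt_iff, ofLex_toLex]
  omega

lemma pvKey_injective (m : Int) : Function.Injective (pvKey m) := by
  intro a b h
  unfold pvKey at h
  have h2 := congrArg (fun p => (ofLex p).2) h
  simpa using h2

-- B's tuple-key reverse sort is the ascending sort by pvKey
lemma sorted2_true_eq (m : Int) (xs : List Int) :
    PySem.List.sorted2 xs (fun x => |x - m|) (fun x => x) true
      = PySem.List.sorted xs (pvKey m) false := by
  have hb : (fun a b : Int =>
        decide (|b - m| < |a - m|) || (!decide (|a - m| < |b - m|) && decide (b < a)))
      = (fun a b : Int => decide (pvKey m a < pvKey m b)) := by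
    funext a b
    by_cases h1 : |b - m| < |a - m| <;> by_cases h2 : |a - m| < |b - m| <;>
      by_cases h3 : b < a <;>
      simp [h1, h2, h3, pvKey_lt_iff] <;> omega
  have h0 : PySem.List.sorted2 xs (fun x => |x - m|) (fun x => x) true
      = List.foldl (fun acc x => PySem.List.insertBy (fun a b : Int =>
          decide (|b - m| < |a - m|) || (!decide (|a - m| < |b - m|) && decide (b < a))) x acc)
        [] xs := rfl
  rw [h0, hb, ← PySem.List.sorted_eq_foldl_insertBy]

-- picking a key-minimal element off a permutation commutes with sorting
lemma sorted_cons_of_min (m : Int) (xs ys : List Int) (y : Int)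
    (hperm : xs.Perm (y :: ys))
    (hmin : ∀ z ∈ ys, pvKey m y ≤ pvKey m z) :
    PySem.List.sorted xs (pvKey m) false = y :: PySem.List.sorted ys (pvKey m) false := by
  apply PySem.List.eq_of_perm_of_pairwise_le_of_injective (pvKey m) (pvKey_injective m)
  · exact ((PySem.List.sorted_perm xs (pvKey m) false).trans hperm).trans
      (List.Perm.cons y (PySem.List.sorted_perm ys (pvKey m) false).symm)
  · exact PySem.List.sorted_pairwise xs (pvKey m)
  · exact List.pairwise_cons.mpr
      ⟨fun z hz => hmin z ((PySem.List.mem_sorted ys (pvKey m) false z).mp hz),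
       PySem.List.sorted_pairwise ys (pvKey m)⟩

-- the V-shape of x ↦ |x - m| on an ascending chain x ≤ z ≤ y
lemma pvAbs_pick_r (x z y m : Int) (hxz : x ≤ z) (hzy : z ≤ y) (h : |x - m| ≤ |y - m|) :
    |z - m| < |y - m| ∨ (|z - m| = |y - m| ∧ z ≤ y) := by
  rcases abs_choice (x - m) with h1 | h1 <;> rcases abs_choice (z - m) with h2 | h2 <;>
    rcases abs_choice (y - m) with h3 | h3 <;>
    have o1 := abs_nonneg (x - m) <;> have o2 := abs_nonneg (z - m) <;>
    have o3 := abs_nonneg (y - m) <;> omega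

lemma pvAbs_pick_l (x z y m : Int) (hxz : x ≤ z) (hzy : z ≤ y) (h : |y - m| < |x - m|) :
    |z - m| < |x - m| ∨ z = x := by
  rcases abs_choice (x - m) with h1 | h1 <;> rcases abs_choice (z - m) with h2 | h2 <;>
    rcases abs_choice (y - m) with h3 | h3 <;>
    have o1 := abs_nonneg (x - m) <;> have o2 := abs_nonneg (z - m) <;>
    have o3 := abs_nonneg (y - m) <;> omega

lemma pvAsc_getElem (s : List Int) (hasc : List.Pairwise (· ≤ ·) s)
    (i j : Nat) (hij : i ≤ j) (hj : j < s.length) : s[i] ≤ s[j] := by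
  rcases Nat.lt_or_ge i j with h | h
  · exact (List.pairwise_iff_getElem.mp hasc) i j (by omega) hj h
  · have : i = j := by omega
    subst this; exact le_refl _

-- membership in a contiguous segment gives an index
lemma pvSeg_mem (s : List Int) (a b : Nat) (z : Int) (hz : z ∈ (s.drop a).take b) :
    ∃ (j : Nat) (hjl : a + j < s.length), j < b ∧ z = s[a + j]'hjl := by
  obtain ⟨i, hi, hzi⟩ := List.getElem_of_mem hz
  have hlen1 : ((s.drop a).take b).length = min b (s.length - a) := by
    simp [List.length_take, List.length_drop]
  have hi1 : i < b := by omega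
  have hjl : a + i < s.length := by omega
  refine ⟨i, hjl, hi1, ?_⟩
  rw [← hzi, List.getElem_take, List.getElem_drop]

-- [x for _, x in zip(range(k), xs)] is xs.take k.toNat (empty for k <= 0)
lemma pvZip_range_take (k : Int) (xs : List Int) :
    ((PySem.List.pyRange 0 k 1).zip xs).map Prod.snd = xs.take k.toNat := by
  have h : ∀ (l1 l2 : List Int), (l1.zip l2).map Prod.snd = l2.take l1.length := by
    intro l1
    induction l1 with
    | nil => intro l2; simp
    | cons a t ih =>
      intro l2
      cases l2 with
      | nil => simp
      | cons b t2 => simp [ih]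
  rw [h, PySem.List.length_pyRange_one]
  norm_num

-- A's loop produces the first `fuel` elements of the segment [l..r] of s sorted by pvKey
lemma loop_eq (s : List Int) (m : Int) (hasc : List.Pairwise (· ≤ ·) s) :
    ∀ (fuel l r : Nat) (ans : List Int), l + fuel ≤ r + 1 → r < s.length →
    getStrongestLoop s m (l : Int) (r : Int) ans fuel
      = ans ++ (PySem.List.sorted ((s.drop l).take (r + 1 - l)) (pvKey m) false).take fuel := by
  intro fuel
  induction fuel with
  | zero => intro l r ans _ _; simp [getStrongestLoop]
  | succ f ih =>
    intro l r ans hlr hr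
    have hl : l ≤ r := by omega
    have hlN : l < s.length := by omega
    have hgr : PySem.List.pyGet? s (r : Int) = some s[r] := by
      rw [PySem.List.pyGet?_natCast, List.getElem?_eq_getElem hr]
    have hgl : PySem.List.pyGet? s (l : Int) = some s[l] := by
      rw [PySem.List.pyGet?_natCast, List.getElem?_eq_getElem hlN]
    rw [getStrongestLoop, hgr, hgl]
    simp only
    by_cases hcond : |s[r] - m| ≥ |s[l] - m|
    · rw [if_pos hcond]
      -- segment decomposition: seg l r = seg l (r-1) ++ [s[r]]
      have hseg : (s.drop l).take (r + 1 - l) = (s.drop l).take (r - l) ++ [s[r]] := by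
        have h1 : r + 1 - l = (r - l) + 1 := by omega
        rw [h1, List.take_succ, List.getElem?_drop,
            show l + (r - l) = r by omega, List.getElem?_eq_getElem hr]
        rfl
      have hmin : ∀ z ∈ (s.drop l).take (r - l), pvKey m s[r] ≤ pvKey m z := by
        intro z hz
        obtain ⟨j, hjl, hj, hzj⟩ := pvSeg_mem s l (r - l) z hz
        subst hzj
        have h1 : s[l] ≤ s[l + j] := pvAsc_getElem s hasc l (l + j) (by omega) hjl
        have h2 : s[l + j] ≤ s[r] := pvAsc_getElem s hasc (l + j) r (by omega) hr
        rw [pvKey_le_iff]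
        exact pvAbs_pick_r s[l] s[l + j] s[r] m h1 h2 hcond
      have hsort : PySem.List.sorted ((s.drop l).take (r + 1 - l)) (pvKey m) false
          = s[r] :: PySem.List.sorted ((s.drop l).take (r - l)) (pvKey m) false := by
        apply sorted_cons_of_min m _ _ _ _ hmin
        rw [hseg]; exact List.perm_append_singleton _ _
      rcases Nat.eq_zero_or_pos f with hf0 | hfpos
      · subst hf0
        simp [getStrongestLoop, hsort]
      · have hr1 : 1 ≤ r := by omega
        have hcast : ((r : Int) - 1) = ((r - 1 : Nat) : Int) := by omega
        rw [hcast, ih l (r - 1) (ans ++ [s[r]]) (by omega) (by omega)]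
        rw [hsort, show (r - 1) + 1 - l = r - l by omega]
        simp
    · rw [if_neg hcond]
      have hcond' : |s[r] - m| < |s[l] - m| := by omega
      have hseg : (s.drop l).take (r + 1 - l) = s[l] :: (s.drop (l + 1)).take (r - l) := by
        rw [List.drop_eq_getElem_cons hlN, show r + 1 - l = (r - l) + 1 by omega]
        rfl
      have hmin : ∀ z ∈ (s.drop (l + 1)).take (r - l), pvKey m s[l] ≤ pvKey m z := by
        intro z hz
        obtain ⟨j, hjl, hj, hzj⟩ := pvSeg_mem s (l + 1) (r - l) z hz
        subst hzj
        have h1 : s[l] ≤ s[l + 1 + j] := pvAsc_getElem s hasc l (l + 1 + j) (by omega) hjl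
        have h2 : s[l + 1 + j] ≤ s[r] := pvAsc_getElem s hasc (l + 1 + j) r (by omega) hr
        rw [pvKey_le_iff]
        rcases pvAbs_pick_l s[l] s[l + 1 + j] s[r] m h1 h2 hcond' with h | h
        · exact Or.inl h
        · exact Or.inr ⟨by rw [h], by omega⟩
      have hsort : PySem.List.sorted ((s.drop l).take (r + 1 - l)) (pvKey m) false
          = s[l] :: PySem.List.sorted ((s.drop (l + 1)).take (r - l)) (pvKey m) false := by
        apply sorted_cons_of_min m _ _ _ _ hmin
        rw [hseg]
      have hcast : ((l : Int) + 1) = ((l + 1 : Nat) : Int) := by omega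
      rw [hcast, ih (l + 1) r (ans ++ [s[l]]) (by omega) hr]
      rw [hsort, show r + 1 - (l + 1) = r - l by omega]
      simp

-- ===== VERDICT (by name: the statement is the Claim_ definition above) =====
theorem getStrongest_spec : Claim_equal_getStrongest := by
  intro arr k _hdom hpre
  obtain ⟨hne, hkn⟩ := hpre
  unfold Spec_getStrongest getStrongest getStrongest_alt
  simp only
  set s := PySem.List.sorted arr (fun x => x) false with hs
  cases hidx : PySem.List.pyGet? s (PySem.Int.floordiv (((s.length : Int)) - 1) 2) with
  | none => rfl
  | some m =>
    show getStrongestLoop s m 0 ((arr.length : Int) - 1) [] k.toNat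
        = ((PySem.List.pyRange 0 k 1).zip
            (PySem.List.sorted2 s (fun x => |x - m|) (fun x => x) true)).map Prod.snd
    have hlen : s.length = arr.length := PySem.List.length_sorted arr (fun x => x) false
    have hn : 1 ≤ arr.length := by
      cases arr with
      | nil => exact absurd rfl hne
      | cons a t => simp
    have hasc : List.Pairwise (· ≤ ·) s := PySem.List.sorted_pairwise arr (fun x => x)
    have hcast0 : (0 : Int) = ((0 : Nat) : Int) := rfl
    have hcastr : (arr.length : Int) - 1 = ((arr.length - 1 : Nat) : Int) := by omega
    rw [pvZip_range_take, sorted2_true_eq m s]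
    rw [hcastr, hcast0,
      loop_eq s m hasc k.toNat 0 (arr.length - 1) [] (by omega) (by omega)]
    simp only [List.drop_zero, List.nil_append]
    rw [show arr.length - 1 + 1 - 0 = s.length from by omega, List.take_length]
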